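-- pv_equiv track=rewrite | github.com/ParkHoH/Algorithm_test | programmers/LV_2/더 맵게.py | solution
-- ===== SOURCE A (Python) =====
-- def solution(scoville, K):
--     cnt = 0
--     scoville.sort(reverse=True)
--     while scoville[-1] < K:
--         if len(scoville) == 1:
--             return -1
--         else:
--             a = scoville.pop()
--             b = scoville.pop()
--             scoville.append(a+b*2)
--             scoville.sort(reverse=True)
--             cnt += 1
--     return cnt
-- ===== SOURCE B (Python) =====
-- def solution(scoville, K):
--     # Keep one ascending sorted list; each round combines the two smallest and
--     # re-inserts the mix with a single ordered insertion instead of a full re-sort.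
--     # (Unlike A, this does not mutate the caller's list.)
--     s = sorted(scoville)
--     cnt = 0
--     while s[0] < K:
--         if len(s) == 1:
--             return -1
--         v = s[0] + 2 * s[1]
--         i = 2
--         while i < len(s) and s[i] <= v:
--             i += 1
--         s = s[2:i] + [v] + s[i:]
--         cnt += 1
--     return cnt
-- ===== Notes on version B (the rewrite author's own statement) =====
-- stated objective: alternative
-- what changed: B keeps a single ascending sorted list and re-inserts each combined value with one ordered insertion, instead of A's descending sort of the whole list after every combination (and B does not mutate the input list).
import Mathlib
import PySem

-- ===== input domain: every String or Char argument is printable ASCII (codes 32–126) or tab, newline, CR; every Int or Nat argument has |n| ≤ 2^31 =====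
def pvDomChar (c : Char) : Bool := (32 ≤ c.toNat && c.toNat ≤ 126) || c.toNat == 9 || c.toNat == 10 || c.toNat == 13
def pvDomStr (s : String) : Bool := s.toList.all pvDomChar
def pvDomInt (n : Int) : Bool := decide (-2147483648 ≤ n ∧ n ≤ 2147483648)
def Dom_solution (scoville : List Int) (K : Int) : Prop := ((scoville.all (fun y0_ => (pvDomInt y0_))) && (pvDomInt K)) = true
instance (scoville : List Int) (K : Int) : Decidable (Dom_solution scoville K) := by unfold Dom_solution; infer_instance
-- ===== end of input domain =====

-- B replaces A's per-iteration full descending re-sort by one ordered insertion into a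
-- single ascending list (objective: alternative); A mutates its argument in place, B does
-- not — the equivalence proved is about the return value only.

-- ===== PORT A =====
-- A's while-loop: list kept sorted descending, scoville[-1] is the minimum.
def solLoopA (s : List Int) (K : Int) (cnt : Int) : Int :=
  match h : s.getLast? with
  | none => 0  -- unreachable under Pre_ (Python raises IndexError on the empty list)
  | some last =>
    if last < K then
      if s.length = 1 then -1
      else
        let a := last
        let s1 := s.dropLast
        let b := s1.getLast?.getD 0
        let s2 := s1.dropLast
        solLoopA (PySem.List.sorted (s2 ++ [a + b * 2]) (fun x => x) true) K (cnt + 1)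
    else cnt
  termination_by s.length
  decreasing_by
    have hne : s ≠ [] := by intro hs; rw [hs] at h; simp at h
    have h1 : 1 ≤ s.length := by cases s; simp at hne; simp
    simp only [PySem.List.length_sorted, List.length_append, List.length_dropLast,
      List.length_cons, List.length_nil]
    omega

def solution (scoville : List Int) (K : Int) : Int :=
  solLoopA (PySem.List.sorted scoville (fun x => x) true) K 0

-- ===== PORT B =====
-- Source B's linear ordered insertion (insert after existing equal elements).
def insortB (t : List Int) (v : Int) : List Int :=
  match t with
  | [] => [v]
  | h :: r => if v < h then v :: h :: r else h :: insortB r v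

-- Source B's while-loop: ascending list, head is the minimum.
def solLoopB (s : List Int) (K : Int) (cnt : Int) : Int :=
  match s with
  | [] => 0  -- unreachable under Pre_ (Python raises IndexError on the empty list)
  | x :: t =>
    if x < K then
      match t with
      | [] => -1
      | y :: t2 => solLoopB (insortB t2 (x + 2 * y)) K (cnt + 1)
    else cnt
  termination_by s.length
  decreasing_by
    have : ∀ (r : List Int) (v : Int), (insortB r v).length = r.length + 1 := by
      intro r v; induction r with
      | nil => simp [insortB]
      | cons h tl ih => simp [insortB]; split <;> simp [ih]
    simp [this]

def solution_alt (scoville : List Int) (K : Int) : Int :=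
  solLoopB (PySem.List.sorted scoville (fun x => x) false) K 0

-- ===== PRECONDITION & SPEC =====
-- Pre_ excludes only the empty list, on which A (scoville[-1]) raises IndexError.
def Pre_solution (scoville : List Int) (_K : Int) : Prop := scoville ≠ []
instance (scoville : List Int) (K : Int) : Decidable (Pre_solution scoville K) := by unfold Pre_solution; infer_instance
def pvWitness_solution : List Int × Int := ([1, 2, 3, 9, 10, 12], 7)

def Spec_solution (scoville : List Int) (K : Int) (out : Int) : Prop := out = solution_alt scoville K
instance (scoville : List Int) (K : Int) (out : Int) : Decidable (Spec_solution scoville K out) := by unfold Spec_solution; infer_instance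

-- ===== CLAIM (what is proved, stated in full; the proofs are below) =====
def Claim_equal_solution : Prop := ∀ (scoville : List Int) (K : Int), Dom_solution scoville K → Pre_solution scoville K → Spec_solution scoville K (solution scoville K)

-- ===== LEMMAS AND PROOFS =====

theorem insortB_length (r : List Int) (v : Int) : (insortB r v).length = r.length + 1 := by
  induction r with
  | nil => simp [insortB]
  | cons h tl ih => simp [insortB]; split <;> simp [ih]

theorem insortB_perm (r : List Int) (v : Int) : (insortB r v).Perm (v :: r) := by
  induction r with
  | nil => simp [insortB]
  | cons h tl ih =>
    simp only [insortB]
    split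
    · exact List.Perm.refl _
    · exact (ih.cons h).trans (List.Perm.swap v h tl)

theorem insortB_mem (r : List Int) (v x : Int) : x ∈ insortB r v ↔ x = v ∨ x ∈ r := by
  have := (insortB_perm r v).mem_iff (a := x); simpa using this

theorem insortB_pairwise (r : List Int) (v : Int) (h : r.Pairwise (· ≤ ·)) :
    (insortB r v).Pairwise (· ≤ ·) := by
  induction r with
  | nil => simp [insortB]
  | cons a tl ih =>
    rcases List.pairwise_cons.1 h with ⟨ha, htl⟩
    simp only [insortB]
    split
    · rename_i hv
      refine List.pairwise_cons.2 ⟨?_, h⟩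
      intro b hb
      rcases List.mem_cons.1 hb with hb | hb
      · omega
      · exact le_of_lt (lt_of_lt_of_le hv (ha b hb))
    · rename_i hv
      refine List.pairwise_cons.2 ⟨?_, ih htl⟩
      intro b hb
      rcases (insortB_mem tl v b).1 hb with hb | hb
      · omega
      · exact ha b hb

-- a descending-ordered rearrangement of xs IS sorted(xs, reverse=True) (values, Int key id)
theorem sorted_rev_eq_of_perm_of_pairwise_ge (xs ys : List Int)
    (hp : ys.Perm xs) (hs : ys.Pairwise (fun a b => b ≤ a)) :
    PySem.List.sorted xs (fun x => x) true = ys := by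
  have h1 : (PySem.List.sorted xs (fun x => x) true).Perm ys :=
    (PySem.List.sorted_perm xs (fun x => x) true).trans hp.symm
  have h2 : (PySem.List.sorted xs (fun x => x) true).Pairwise (fun a b => b ≤ a) := by
    have := PySem.List.sorted_pairwise_rev (xs := xs) (key := fun x : Int => x)
    simpa using this
  exact List.Perm.eq_of_pairwise (by intro a b _ _ h1 h2; omega) h2 hs h1

-- the bisimulation: A's state is the reverse of B's ascending state
theorem loop_eq (n : ℕ) (K : Int) : ∀ (s : List Int) (cnt : Int), s.length ≤ n →
    s.Pairwise (· ≤ ·) → solLoopA s.reverse K cnt = solLoopB s K cnt := by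
  induction n with
  | zero =>
    intro s cnt hn _
    have : s = [] := List.length_eq_zero_iff.mp (Nat.le_zero.mp hn)
    subst this; simp [solLoopA, solLoopB]
  | succ n ih =>
    intro s cnt hn hs
    cases s with
    | nil => simp [solLoopA, solLoopB]
    | cons x t =>
      rw [solLoopA.eq_def, solLoopB.eq_def]
      have hlast : (x :: t).reverse.getLast? = some x := by
        simp [List.getLast?_reverse]
      rw [hlast]
      simp only
      by_cases hx : x < K
      · rw [if_pos hx, if_pos hx]
        cases t with
        | nil => simp
        | cons y t2 =>
          have hlen : (x :: y :: t2).reverse.length ≠ 1 := by simp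
          rw [if_neg hlen]
          have hdl1 : (x :: y :: t2).reverse.dropLast = (y :: t2).reverse := by
            simp [List.reverse_cons]
          have hdl2 : (y :: t2).reverse.dropLast = t2.reverse := by
            simp [List.reverse_cons]
          have hb : (y :: t2).reverse.getLast?.getD 0 = y := by
            simp [List.getLast?_reverse]
          rcases List.pairwise_cons.1 hs with ⟨hx1, hs1⟩
          rcases List.pairwise_cons.1 hs1 with ⟨hy1, hs2⟩
          have hv : x + y * 2 = x + 2 * y := by ring
          have hkey : PySem.List.sorted (t2.reverse ++ [x + y * 2]) (fun x => x) true
              = (insortB t2 (x + 2 * y)).reverse := by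
            apply sorted_rev_eq_of_perm_of_pairwise_ge
            · have p1 : ((insortB t2 (x + 2 * y)).reverse).Perm (insortB t2 (x + 2 * y)) :=
                List.reverse_perm _
              have p2 := insortB_perm t2 (x + 2 * y)
              have p3 : ((x + 2 * y) :: t2).Perm (t2 ++ [x + 2 * y]) :=
                (List.perm_append_singleton _ _).symm
              have p4 : (t2 ++ [x + 2 * y]).Perm (t2.reverse ++ [x + y * 2]) := by
                rw [hv]
                exact List.Perm.append_right _ (List.reverse_perm t2).symm
              exact ((p1.trans p2).trans p3).trans p4
            · rw [List.pairwise_reverse]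
              exact insortB_pairwise t2 (x + 2 * y) hs2
          rw [hdl1, hb, hdl2, hkey]
          exact ih (insortB t2 (x + 2 * y)) (cnt + 1)
            (by simp [insortB_length] at *; omega)
            (insortB_pairwise t2 (x + 2 * y) hs2)
      · rw [if_neg hx, if_neg hx]

theorem sorted_true_eq_reverse (xs : List Int) :
    PySem.List.sorted xs (fun x => x) true = (PySem.List.sorted xs (fun x => x) false).reverse := by
  apply sorted_rev_eq_of_perm_of_pairwise_ge
  · exact (List.reverse_perm _).trans (PySem.List.sorted_perm xs (fun x => x) false)
  · rw [List.pairwise_reverse]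
    have := PySem.List.sorted_pairwise (xs := xs) (key := fun x : Int => x)
    simpa using this

-- ===== VERDICT (by name: the statement is the Claim_ definition above) =====
theorem solution_spec : Claim_equal_solution := by
  intro scoville K _ _
  unfold Spec_solution solution solution_alt
  rw [sorted_true_eq_reverse]
  apply loop_eq (PySem.List.sorted scoville (fun x => x) false).length
  · exact le_rfl
  · have := PySem.List.sorted_pairwise (xs := scoville) (key := fun x : Int => x)
    simpa using this
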